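-- pv_equiv track=rewrite | github.com/Di-santos/MIT-Python-Exercises-IPL-2021 | codewars/String matchup.py | solve
-- ===== SOURCE A (Python) =====
-- def solve(stringA,stringB):
--     repeticoes = {}
--     for palavra in stringB:
--         repeticoes.setdefault(palavra, 0)
--
--     for palavra in stringA:
--         if palavra in stringB:
--             repeticoes[palavra] +=1
--
--     return list(repeticoes.values())
-- ===== SOURCE B (Python) =====
-- def solve(stringA, stringB):
--     out = []
--     seen = set()
--     for w in stringB:
--         if w not in seen:
--             seen.add(w)
--             out.append(stringA.count(w))
--     return out
-- ===== Notes on version B (the rewrite author's own statement) =====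
-- stated objective: alternative
-- what changed: Inverted traversal with no dict at all: instead of building a dict keyed by stringB and incrementing it while scanning stringA, B makes a single pass over stringB, skipping already-seen words with a set, and for each new word counts its occurrences in stringA with list.count.
import Mathlib
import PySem

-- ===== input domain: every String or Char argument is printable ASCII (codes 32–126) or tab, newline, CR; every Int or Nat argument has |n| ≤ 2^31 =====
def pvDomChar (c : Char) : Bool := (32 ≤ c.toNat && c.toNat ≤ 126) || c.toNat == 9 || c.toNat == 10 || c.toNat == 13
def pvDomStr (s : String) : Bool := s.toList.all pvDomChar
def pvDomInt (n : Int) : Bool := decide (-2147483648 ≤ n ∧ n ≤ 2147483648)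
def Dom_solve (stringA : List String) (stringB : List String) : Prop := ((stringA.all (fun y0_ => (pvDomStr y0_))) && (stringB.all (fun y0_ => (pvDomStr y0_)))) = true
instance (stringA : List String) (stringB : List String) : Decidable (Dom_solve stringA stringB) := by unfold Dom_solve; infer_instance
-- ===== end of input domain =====

-- B drops the dict entirely: one pass over stringB with a seen-set, counting each new word in stringA via list.count (alternative decomposition, same cost).

-- ===== PORT A =====
def solve (stringA : List String) (stringB : List String) : List Int :=
  -- repeticoes = {}; for palavra in stringB: repeticoes.setdefault(palavra, 0)
  let repeticoes : PySem.Dict String Int :=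
    stringB.foldl (fun d palavra => d.setdefault palavra 0) PySem.Dict.empty
  -- for palavra in stringA: if palavra in stringB: repeticoes[palavra] += 1
  -- (the key is present whenever the branch fires, so the modify default 0 is never used)
  let repeticoes :=
    stringA.foldl (fun d palavra => if palavra ∈ stringB then d.modify palavra 0 (· + 1) else d)
      repeticoes
  repeticoes.values

-- ===== PORT B =====
def solve_alt (stringA : List String) (stringB : List String) : List Int :=
  -- out = []; seen = set()
  -- for w in stringB: if w not in seen: seen.add(w); out.append(stringA.count(w))
  let st : PySem.Set String × List Int :=
    stringB.foldl
      (fun p w =>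
        if PySem.Set.contains p.1 w then p
        else (PySem.Set.add p.1 w, p.2 ++ [(stringA.count w : Int)]))
      (PySem.Set.empty, [])
  st.2

-- ===== PRECONDITION & SPEC =====
def Spec_solve (stringA : List String) (stringB : List String) (out : List Int) : Prop := out = solve_alt stringA stringB
instance (stringA : List String) (stringB : List String) (out : List Int) : Decidable (Spec_solve stringA stringB out) := by unfold Spec_solve; infer_instance

-- ===== CLAIM =====
def Claim_equal_solve : Prop := ∀ (stringA : List String) (stringB : List String), Dom_solve stringA stringB → Spec_solve stringA stringB (solve stringA stringB)

-- ===== LEMMAS AND PROOFS =====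

-- proof-only helper: the new (not-yet-seen) words of l, deduplicated, in order
def dedupFrom (s : PySem.Set String) : List String → List String
  | [] => []
  | w :: l => if PySem.Set.contains s w then dedupFrom s l
              else w :: dedupFrom (PySem.Set.add s w) l

theorem dedupFrom_append (s : PySem.Set String) (l : List String) :
    s ++ dedupFrom s l = PySem.Set.update s l := by
  induction l generalizing s with
  | nil => simp [dedupFrom, PySem.Set.update]
  | cons w l ih =>
    rw [show PySem.Set.update s (w :: l) = PySem.Set.update (PySem.Set.add s w) l from rfl]
    by_cases h : PySem.Set.contains s w = true
    · rw [dedupFrom, if_pos h, show PySem.Set.add s w = s from by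
        simp only [PySem.Set.add, h, if_pos]]
      exact ih s
    · rw [dedupFrom, if_neg h, ← ih (PySem.Set.add s w),
        show PySem.Set.add s w = s ++ [w] from by
          simp only [PySem.Set.add, h, if_neg, Bool.false_eq_true, not_false_iff]]
      simp

theorem dedupFrom_empty (l : List String) :
    dedupFrom PySem.Set.empty l = PySem.List.dedup l := by
  have := dedupFrom_append PySem.Set.empty l
  simpa [PySem.Set.empty, PySem.Set.update, PySem.Set.ofList_eq_foldl] using this

-- the seen-set loop of B appends exactly the mapped new words
theorem foldl_seen_loop (f : String → Int) (l : List String)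
    (s : PySem.Set String) (out : List Int) :
    (l.foldl
      (fun p w =>
        if PySem.Set.contains p.1 w then p
        else (PySem.Set.add p.1 w, p.2 ++ [f w])) (s, out)).2
      = out ++ (dedupFrom s l).map f := by
  induction l generalizing s out with
  | nil => simp [dedupFrom]
  | cons w l ih =>
    rw [List.foldl_cons]
    by_cases h : PySem.Set.contains s w = true
    · rw [if_pos h, ih, dedupFrom, if_pos h]
    · rw [if_neg h, ih, dedupFrom, if_neg h]
      simp

theorem solve_alt_eq_map (stringA stringB : List String) :
    solve_alt stringA stringB
      = (PySem.List.dedup stringB).map (fun w => (stringA.count w : Int)) := by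
  dsimp only [solve_alt]
  rw [foldl_seen_loop, dedupFrom_empty]
  simp

-- the setdefault loop: keys are Set.update of the old keys
theorem keys_foldl_setdefault (l : List String) (d : PySem.Dict String Int) :
    (l.foldl (fun d w => d.setdefault w 0) d).keys = PySem.Set.update d.keys l := by
  induction l generalizing d with
  | nil => rfl
  | cons w l ih =>
    rw [List.foldl_cons, ih]
    rw [show PySem.Set.update d.keys (w :: l) = PySem.Set.update (PySem.Set.add d.keys w) l from rfl]
    congr 1
    by_cases h : d.contains w = true
    · rw [PySem.Dict.setdefault_of_contains _ _ h]
      have hw : w ∈ d.keys := (PySem.Dict.contains_iff_mem_keys d w).mp h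
      simp [PySem.Set.add, PySem.Set.contains, hw]
    · rw [PySem.Dict.setdefault_of_not_contains _ _ (by simpa using h),
        PySem.Dict.keys_insert_of_not_contains _ _ (by simpa using h)]
      have hnm : ¬ w ∈ d.keys := fun hm => h ((PySem.Dict.contains_iff_mem_keys d w).mpr hm)
      simp [PySem.Set.add, PySem.Set.contains, hnm]

-- the setdefault loop keeps every default-0 lookup at 0
theorem getD_foldl_setdefault (l : List String) (d : PySem.Dict String Int)
    (h : ∀ w, d.getD w 0 = 0) (w : String) :
    (l.foldl (fun d w => d.setdefault w 0) d).getD w 0 = 0 := by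
  induction l generalizing d with
  | nil => exact h w
  | cons x l ih =>
    simp only [List.foldl_cons]
    apply ih
    intro v
    by_cases hc : d.contains x = true
    · rw [PySem.Dict.setdefault_of_contains _ _ hc]; exact h v
    · rw [PySem.Dict.setdefault_of_not_contains _ _ (by simpa using hc),
        PySem.Dict.getD_insert]
      split_ifs with hvx
      · rfl
      · exact h v

-- updating a set with elements it already has changes nothing
theorem set_update_of_subset (l s : List String) (h : ∀ x ∈ l, x ∈ s) :
    PySem.Set.update s l = s := by
  induction l generalizing s with
  | nil => rfl
  | cons x l ih =>
    have hx : x ∈ s := h x (by simp)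
    have : PySem.Set.add s x = s := by simp [PySem.Set.add, PySem.Set.contains, hx]
    rw [show PySem.Set.update s (x :: l) = l.foldl PySem.Set.add (PySem.Set.add s x) from rfl,
      this]
    exact ih s (fun y hy => h y (by simp [hy]))

theorem solve_spec : Claim_equal_solve := by
  intro stringA stringB _
  unfold Spec_solve
  rw [solve_alt_eq_map]
  dsimp only [solve]
  -- the first loop of A
  set d1 : PySem.Dict String Int := stringB.foldl (fun d palavra => d.setdefault palavra 0) PySem.Dict.empty with hd1
  have hkeys1 : d1.keys = PySem.List.dedup stringB := by
    rw [hd1, keys_foldl_setdefault]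
    rfl
  have hget1 : ∀ w, d1.getD w 0 = 0 :=
    getD_foldl_setdefault _ _ (fun w => by simp [pysem])
  -- the second loop of A, as a loop over the filtered list
  have hfilt : stringA.foldl
      (fun d palavra => if palavra ∈ stringB then d.modify palavra 0 (· + 1) else d) d1
      = (stringA.filter (fun x => decide (x ∈ stringB))).foldl
          (fun d palavra => d.modify palavra 0 (· + 1)) d1 := by
    rw [PySem.List.foldl_ite_eq_foldl_filter]
  rw [hfilt]
  set l := stringA.filter (fun x => decide (x ∈ stringB)) with hl
  set d2 := l.foldl (fun d palavra => d.modify palavra 0 (· + 1)) d1 with hd2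
  have hkeys2 : d2.keys = PySem.List.dedup stringB := by
    rw [hd2, PySem.Dict.keys_foldl_modify, hkeys1, set_update_of_subset]
    intro x hx
    rw [hl] at hx
    have : x ∈ stringB := by simpa using (List.mem_filter.mp hx).2
    simpa [PySem.List.mem_dedup] using this
  have hnd2 : d2.keys.Nodup := by rw [hkeys2]; exact PySem.List.nodup_dedup stringB
  have hget2 : ∀ w ∈ stringB, d2.getD w 0 = (stringA.count w : Int) := by
    intro w hw
    rw [hd2, PySem.Dict.getD_foldl_modify_add_one, hget1, hl]
    rw [List.count_filter (by simpa using hw)]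
    simp
  rw [PySem.Dict.values_eq_map_keys d2 hnd2 0, hkeys2]
  apply List.map_congr_left
  intro w hw
  rw [hget2 w (by simpa [PySem.List.mem_dedup] using hw)]
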